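-- pv_equiv track=rewrite | github.com/shuo-zhou/DawfMRI | experiment/4.6_tca_cdsvm.py | get_src_pairs
-- ===== SOURCE A (Python) =====
-- TASK_LIST = [1, 2, 3, 4, 5, 6, 8, 9, 10, 21, 22]
--
-- def get_src_pairs(target=[], exclude = []):
--     pairs = []
--     for i in range(len(TASK_LIST)):
--         src1 = TASK_LIST[i]
--         if src1 not in target and src1 not in exclude:
--             for j in range(i+1, len(TASK_LIST)):
--                 src2 = TASK_LIST[j]
--                 if src2 not in target and src2 not in exclude:
--                     pairs.append([src1, src2])
--     return pairs
-- ===== SOURCE B (Python) =====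
-- TASK_LIST = [1, 2, 3, 4, 5, 6, 8, 9, 10, 21, 22]
--
-- def _all_pairs(lst):
--     if not lst:
--         return []
--     head, rest = lst[0], lst[1:]
--     return [[head, y] for y in rest] + _all_pairs(rest)
--
-- # all 55 ordered pairs of TASK_LIST, precomputed once at module load
-- _ALL_PAIRS = _all_pairs(TASK_LIST)
--
-- def get_src_pairs(target=[], exclude=[]):
--     banned = set(target) | set(exclude)
--     return [p for p in _ALL_PAIRS if banned.isdisjoint(p)]
-- ===== Notes on version B (the rewrite author's own statement) =====
-- stated objective: alternative
-- what changed: Pair-first-filter-second over a constant table: all 55 candidate pairs of TASK_LIST are precomputed once at module level, and the function is a single flat scan over that table keeping the pairs disjoint from the banned set (set(target)|set(exclude)), instead of A's nested index loops interleaving list-membership tests with pair construction.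
import Mathlib
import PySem

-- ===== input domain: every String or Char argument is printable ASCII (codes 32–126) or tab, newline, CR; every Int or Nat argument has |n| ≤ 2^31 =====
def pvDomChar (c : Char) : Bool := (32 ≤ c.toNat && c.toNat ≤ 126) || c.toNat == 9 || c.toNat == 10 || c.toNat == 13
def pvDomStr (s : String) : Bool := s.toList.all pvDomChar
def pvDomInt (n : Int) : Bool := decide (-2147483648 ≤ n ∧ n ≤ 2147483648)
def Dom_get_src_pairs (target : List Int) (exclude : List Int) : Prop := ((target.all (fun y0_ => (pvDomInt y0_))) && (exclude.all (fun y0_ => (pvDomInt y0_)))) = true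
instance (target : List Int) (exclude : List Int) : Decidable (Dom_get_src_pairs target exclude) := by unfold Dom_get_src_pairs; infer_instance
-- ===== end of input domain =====

-- B precomputes the constant table of all 55 candidate pairs of TASK_LIST once and
-- filters that table by disjointness from the banned set, instead of A's nested
-- index loops interleaving membership tests with pair construction (objective: alternative).

-- ===== PORT A =====
def TASK_LIST : List Int := [1, 2, 3, 4, 5, 6, 8, 9, 10, 21, 22]

-- literal transliteration of A: outer index loop i over range(len(TASK_LIST)),
-- inner index loop j over range(i+1, len(TASK_LIST)), membership tested inside both
-- loops.  TASK_LIST[i] is ported as pyGetD with default 0: every index produced by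
-- the ranges is in range, so the default is never used (exact there).
def get_src_pairs (target : List Int) (exclude : List Int) : List (List Int) :=
  (PySem.List.pyRange 0 (TASK_LIST.length : Int) 1).foldl (fun pairs i =>
    let src1 := PySem.List.pyGetD TASK_LIST i 0
    if src1 ∉ target ∧ src1 ∉ exclude then
      (PySem.List.pyRange (i + 1) (TASK_LIST.length : Int) 1).foldl (fun pairs j =>
        let src2 := PySem.List.pyGetD TASK_LIST j 0
        if src2 ∉ target ∧ src2 ∉ exclude then pairs ++ [[src1, src2]] else pairs) pairs
    else pairs) []

-- ===== PORT B =====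
-- _all_pairs(lst): structural recursion on the list, [head, y] for each y of the rest,
-- then the pairs of the rest
def pvAllPairsFn : List Int → List (List Int)
  | [] => []
  | x :: xs => xs.map (fun y => [x, y]) ++ pvAllPairsFn xs

-- _ALL_PAIRS, precomputed at module level
def ALL_PAIRS : List (List Int) := pvAllPairsFn TASK_LIST

def get_src_pairs_alt (target : List Int) (exclude : List Int) : List (List Int) :=
  let banned := PySem.Set.union (PySem.Set.ofList target) (PySem.Set.ofList exclude)
  ALL_PAIRS.filter (fun p => PySem.Set.isdisjoint banned p)

-- ===== PRECONDITION & SPEC =====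
def Spec_get_src_pairs (target : List Int) (exclude : List Int) (out : List (List Int)) : Prop := out = get_src_pairs_alt target exclude
instance (target : List Int) (exclude : List Int) (out : List (List Int)) : Decidable (Spec_get_src_pairs target exclude out) := by unfold Spec_get_src_pairs; infer_instance

-- ===== CLAIM (what is proved, stated in full; the proofs are below) =====
def Claim_equal_get_src_pairs : Prop := ∀ (target : List Int) (exclude : List Int), Dom_get_src_pairs target exclude → Spec_get_src_pairs target exclude (get_src_pairs target exclude)

-- ===== LEMMAS AND PROOFS =====

-- A's outer-loop body, with the membership test abstracted into p
def pvOuterBody (p : Int → Prop) [DecidablePred p] (pairs : List (List Int)) (i : Int) : List (List Int) :=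
  let src1 := PySem.List.pyGetD TASK_LIST i 0
  if p src1 then
    (PySem.List.pyRange (i + 1) (TASK_LIST.length : Int) 1).foldl (fun pairs j =>
      let src2 := PySem.List.pyGetD TASK_LIST j 0
      if p src2 then pairs ++ [[src1, src2]] else pairs) pairs
  else pairs

-- A's inner loop over a (structural) list collects the filtered partners of s
theorem pvInner_eq (p : Int → Prop) [DecidablePred p] (s : Int) (l : List Int) :
    ∀ acc : List (List Int),
      l.foldl (fun pairs y => if p y then pairs ++ [[s, y]] else pairs) acc
        = acc ++ (l.filter (fun y => decide (p y))).map (fun y => [s, y]) := by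
  induction l with
  | nil => intro acc; simp
  | cons x xs ih =>
      intro acc
      by_cases h : p x <;> simp [List.foldl_cons, h, ih]

-- A's outer loop, started at index k, produces the pairs of the filtered suffix
theorem pvOuter_eq (p : Int → Prop) [DecidablePred p] :
    ∀ (m k : Nat) (acc : List (List Int)), k + m = TASK_LIST.length →
      (PySem.List.pyRange (k : Int) (TASK_LIST.length : Int) 1).foldl (pvOuterBody p) acc
        = acc ++ pvAllPairsFn ((TASK_LIST.drop k).filter (fun t => decide (p t))) := by
  intro m
  induction m with
  | zero =>
      intro k acc hk
      have hk' : k = TASK_LIST.length := by omega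
      subst hk'
      rw [PySem.List.pyRange_one_eq_nil (le_refl _)]
      simp [pvAllPairsFn]
  | succ m ih =>
      intro k acc hk
      have hklt : k < TASK_LIST.length := by omega
      have hcast : ((k : Int) + 1) = ((k + 1 : Nat) : Int) := by push_cast; ring
      rw [PySem.List.pyRange_one_cons (by exact_mod_cast hklt), List.foldl_cons]
      have hdrop : TASK_LIST.drop k = TASK_LIST[k] :: TASK_LIST.drop (k + 1) :=
        List.drop_eq_getElem_cons hklt
      have hsrc : PySem.List.pyGetD TASK_LIST (k : Int) 0 = TASK_LIST[k] := by
        rw [PySem.List.pyGetD_natCast, List.getD_eq_getElem _ _ hklt]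
      have hinner : ∀ acc' : List (List Int),
          (PySem.List.pyRange ((k : Int) + 1) (TASK_LIST.length : Int) 1).foldl
            (fun pairs j =>
              if p (PySem.List.pyGetD TASK_LIST j 0) then
                pairs ++ [[TASK_LIST[k], PySem.List.pyGetD TASK_LIST j 0]]
              else pairs) acc'
          = acc' ++ ((TASK_LIST.drop (k + 1)).filter (fun y => decide (p y))).map
              (fun y => [TASK_LIST[k], y]) := by
        intro acc'
        have e := PySem.List.foldl_pyRange_pyGetD' TASK_LIST (0 : Int)
            (fun pairs y => if p y then pairs ++ [[TASK_LIST[k], y]] else pairs) acc'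
            (a := (k : Int) + 1) (by omega)
        have ht : ((k : Int) + 1).toNat = k + 1 := by omega
        rw [ht] at e
        exact e.trans (pvInner_eq p (TASK_LIST[k]) (TASK_LIST.drop (k + 1)) acc')
      by_cases h : p TASK_LIST[k]
      · have hbody : pvOuterBody p acc (k : Int)
            = acc ++ ((TASK_LIST.drop (k + 1)).filter (fun y => decide (p y))).map
                (fun y => [TASK_LIST[k], y]) := by
          simp only [pvOuterBody, hsrc, if_pos h]
          exact hinner acc
        rw [hbody, hcast, ih (k + 1) _ (by omega), hdrop, List.filter_cons]
        simp [h, pvAllPairsFn]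
      · have hbody : pvOuterBody p acc (k : Int) = acc := by
          simp only [pvOuterBody, hsrc, if_neg h]
        rw [hbody, hcast, ih (k + 1) _ (by omega), hdrop, List.filter_cons]
        simp [h]

-- filtering the pair table by "all components satisfy q" = pairing the q-filtered list
theorem pvPairs_filter (q : Int → Bool) :
    ∀ l : List Int,
      (pvAllPairsFn l).filter (fun p => p.all q) = pvAllPairsFn (l.filter q) := by
  intro l
  induction l with
  | nil => simp [pvAllPairsFn]
  | cons x xs ih =>
      by_cases h : q x = true
      · simp [pvAllPairsFn, List.filter_append, List.filter_map, h, ih,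
          Function.comp_def, List.all_cons, List.all_nil]
      · simp [pvAllPairsFn, List.filter_append, List.filter_map, h, ih,
          Function.comp_def, List.all_cons, List.all_nil]

-- B's disjointness test equals the componentwise membership test
theorem pvDisjoint_eq (target exclude : List Int) (p : List Int) :
    PySem.Set.isdisjoint
      (PySem.Set.union (PySem.Set.ofList target) (PySem.Set.ofList exclude)) p
      = p.all (fun y => decide (y ∉ target ∧ y ∉ exclude)) := by
  rw [Bool.eq_iff_iff]
  simp [PySem.Set.isdisjoint_iff, PySem.Set.mem_union, PySem.Set.mem_ofList,
    List.all_eq_true]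
  constructor
  · intro h y hy
    exact ⟨fun ht => h y (Or.inl ht) hy, fun he => h y (Or.inr he) hy⟩
  · intro h x hx hxp
    rcases hx with ht | he
    · exact (h x hxp).1 ht
    · exact (h x hxp).2 he

-- ===== VERDICT (by name: the statement is the Claim_ definition above) =====
theorem get_src_pairs_spec : Claim_equal_get_src_pairs := by
  intro target exclude _
  unfold Spec_get_src_pairs
  have h := pvOuter_eq (fun t => t ∉ target ∧ t ∉ exclude) TASK_LIST.length 0 [] (by omega)
  simp only [Nat.cast_zero, List.drop_zero, List.nil_append] at h
  rw [get_src_pairs_alt]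
  simp only [ALL_PAIRS]
  conv_rhs =>
    rw [List.filter_congr (fun p _ => pvDisjoint_eq target exclude p)]
  rw [pvPairs_filter]
  exact h
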